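-- pv_equiv track=rewrite | github.com/shallgrimson/Coursera-Data-Structures-and-Algorithms-Specialization | Algorithms on Strings/Week 3 and 4/p3_suffix_array_matching.py | compute_char_classes
-- ===== SOURCE A (Python) =====
-- def compute_char_classes(S, order):
--     char_classes = [0 for _ in range(len(S))]
--     char_classes[order[0]] = 0
--     for i in range(1, len(S)):
--         if S[order[i]] != S[order[i-1]]:
--             char_classes[order[i]] = char_classes[order[i-1]]+1
--         else:
--             char_classes[order[i]] = char_classes[order[i-1]]
--
--     return char_classes
-- ===== SOURCE B (Python) =====
-- def compute_char_classes(S, order):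
--     n = len(S)
--     positions = [order[i] for i in range(n)]
--     # group the sorted positions into maximal runs of equal characters
--     runs = []
--     for j in positions:
--         if runs and S[runs[-1][-1]] == S[j]:
--             runs[-1].append(j)
--         else:
--             runs.append([j])
--     # the class of every position in the k-th run is k
--     char_classes = [0] * n
--     for cls, run in enumerate(runs):
--         for j in run:
--             char_classes[j] = cls
--     return char_classes
-- ===== Notes on version B (the rewrite author's own statement) =====
-- stated objective: alternative
-- what changed: A's single in-place loop with read-back from the output array (each class read from the cell written one step earlier, incremented on a mismatch) is replaced by a run-length grouping: the sorted positions are partitioned into maximal runs of equal characters (a list of lists), and then every position in the k-th run is assigned class k by an enumerate-scatter pass.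
import Mathlib
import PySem

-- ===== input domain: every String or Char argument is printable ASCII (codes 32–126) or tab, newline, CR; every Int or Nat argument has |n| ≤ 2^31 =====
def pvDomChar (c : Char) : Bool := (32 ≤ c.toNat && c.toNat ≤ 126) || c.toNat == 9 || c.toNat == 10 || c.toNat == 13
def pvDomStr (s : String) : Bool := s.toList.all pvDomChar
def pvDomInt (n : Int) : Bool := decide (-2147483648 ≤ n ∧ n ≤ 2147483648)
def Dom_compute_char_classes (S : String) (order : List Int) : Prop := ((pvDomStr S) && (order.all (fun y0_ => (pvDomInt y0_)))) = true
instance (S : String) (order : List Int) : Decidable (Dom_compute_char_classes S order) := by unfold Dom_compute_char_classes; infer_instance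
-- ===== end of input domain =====

-- B replaces A's in-place loop with read-back by run-length grouping plus an enumerate-scatter pass (objective: alternative).

-- ===== PORT A =====
def compute_char_classes (S : String) (order : List Int) : List Int :=
  let cs := S.toList
  let char_classes := List.replicate cs.length (0 : Int)
  let char_classes := PySem.List.pySetD char_classes (PySem.List.pyGetD order 0 0) 0
  (PySem.List.pyRange 1 (cs.length : Int)).foldl (fun cc i =>
    if PySem.List.pyGetD cs (PySem.List.pyGetD order i 0) ' '
         ≠ PySem.List.pyGetD cs (PySem.List.pyGetD order (i - 1) 0) ' ' then
      PySem.List.pySetD cc (PySem.List.pyGetD order i 0)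
        (PySem.List.pyGetD cc (PySem.List.pyGetD order (i - 1) 0) 0 + 1)
    else
      PySem.List.pySetD cc (PySem.List.pyGetD order i 0)
        (PySem.List.pyGetD cc (PySem.List.pyGetD order (i - 1) 0) 0)) char_classes

-- ===== PORT B =====
def compute_char_classes_alt (S : String) (order : List Int) : List Int :=
  let cs := S.toList
  let n := cs.length
  let positions := (PySem.List.pyRange 0 (n : Int)).map (fun i => PySem.List.pyGetD order i 0)
  let runs := positions.foldl
    (fun (runs : List (List Int)) j =>
      match runs.getLast? with
      | some r =>
        if PySem.List.pyGetD cs (r.getLastD 0) ' ' = PySem.List.pyGetD cs j ' '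
        then runs.dropLast ++ [r ++ [j]]
        else runs ++ [[j]]
      | none => runs ++ [[j]]) []
  let char_classes := List.replicate n (0 : Int)
  (PySem.List.enumerate runs 0).foldl
    (fun res kr => kr.2.foldl (fun res j => PySem.List.pySetD res j kr.1) res)
    char_classes

-- ===== PRECONDITION & SPEC =====
-- Pre_ excludes exactly the inputs on which A raises IndexError: the empty string, an order
-- shorter than the string, or an order entry outside Python's index range for the string.
def Pre_compute_char_classes (S : String) (order : List Int) : Prop :=
  1 ≤ S.toList.length ∧ S.toList.length ≤ order.length ∧
  ∀ j ∈ order.take S.toList.length,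
    -(S.toList.length : Int) ≤ j ∧ j < (S.toList.length : Int)
instance (S : String) (order : List Int) : Decidable (Pre_compute_char_classes S order) := by
  unfold Pre_compute_char_classes; infer_instance
def pvWitness_compute_char_classes : String × List Int := ("ab", [0, 1])

def Spec_compute_char_classes (S : String) (order : List Int) (out : List Int) : Prop := out = compute_char_classes_alt S order
instance (S : String) (order : List Int) (out : List Int) : Decidable (Spec_compute_char_classes S order out) := by unfold Spec_compute_char_classes; infer_instance

-- ===== CLAIM (what is proved, stated in full; the proofs are below) =====
def Claim_equal_compute_char_classes : Prop := ∀ (S : String) (order : List Int), Dom_compute_char_classes S order → Pre_compute_char_classes S order → Spec_compute_char_classes S order (compute_char_classes S order)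

-- ===== LEMMAS AND PROOFS =====

-- Python index normalisation (matches PySem.List.pyIdx? on in-range indices).
def pvNorm (n : Nat) (i : Int) : Nat := if 0 ≤ i then i.toNat else n - (-i).toNat

-- Reference loop for A: state = (previous position, current class, class array).
def pvStep (cs : List Char) (st : Nat × Int × List Int) (j : Nat) : Nat × Int × List Int :=
  let c' := if cs.getD j ' ' ≠ cs.getD st.1 ' ' then st.2.1 + 1 else st.2.1
  (j, c', st.2.2.set j c')

-- Label sequence in normalised (Nat) positions.
def pvLabels (cs : List Char) : Nat → Int → List Nat → List Int
  | _, _, [] => []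
  | prev, c, j :: t =>
    let c' := if cs.getD j ' ' ≠ cs.getD prev ' ' then c + 1 else c
    c' :: pvLabels cs j c' t

-- Label sequence in raw Int positions, as B's grouping assigns classes.
def pvLab (cs : List Char) : Int → Int → List Int → List Int
  | _, _, [] => []
  | p, c, j :: t =>
    let c' := if PySem.List.pyGetD cs p ' ' = PySem.List.pyGetD cs j ' ' then c else c + 1
    c' :: pvLab cs j c' t

-- B's fold step building the runs, named for the lemmas below.
def pvRunsStep (cs : List Char) : List (List Int) → Int → List (List Int) :=
  fun runs j =>
    match runs.getLast? with
    | some r =>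
      if PySem.List.pyGetD cs (r.getLastD 0) ' ' = PySem.List.pyGetD cs j ' '
      then runs.dropLast ++ [r ++ [j]]
      else runs ++ [[j]]
    | none => runs ++ [[j]]

-- Flatten a run list with its enumerate index: the sequence of (position, class) writes.
def pvFW : List (List Int) → Int → List (Int × Int)
  | [], _ => []
  | r :: t, s => r.map (fun j => (j, s)) ++ pvFW t (s + 1)

lemma pvIdx_eq {n : Nat} {i : Int} (h : -(n : Int) ≤ i ∧ i < (n : Int)) :
    PySem.List.pyIdx? n i = some (pvNorm n i) := by
  simp only [PySem.List.pyIdx?, pvNorm]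
  split_ifs <;> simp_all

lemma pvNorm_lt {n : Nat} {i : Int} (h : -(n : Int) ≤ i ∧ i < (n : Int)) : pvNorm n i < n := by
  unfold pvNorm; split_ifs <;> omega

lemma pvGetD_eq {α : Type} (xs : List α) {i : Int} (d : α)
    (h : -(xs.length : Int) ≤ i ∧ i < (xs.length : Int)) :
    PySem.List.pyGetD xs i d = xs.getD (pvNorm xs.length i) d := by
  simp [PySem.List.pyGetD, PySem.List.pyGet?, pvIdx_eq h, List.getD_eq_getElem?_getD]

lemma pvSetD_eq {α : Type} (xs : List α) {i : Int} (v : α)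
    (h : -(xs.length : Int) ≤ i ∧ i < (xs.length : Int)) :
    PySem.List.pySetD xs i v = xs.set (pvNorm xs.length i) v := by
  simp [PySem.List.pySetD, PySem.List.pySet?, pvIdx_eq h]

lemma pvMemTake (order : List Int) {n m : Nat} (hm : m < n) (hn : n ≤ order.length) :
    order.getD m 0 ∈ order.take n := by
  have hml : m < order.length := lt_of_lt_of_le hm hn
  rw [List.getD_eq_getElem _ _ hml]
  have hmt : m < (order.take n).length := by simp [List.length_take]; omega
  have : order[m] = (order.take n)[m] := (List.getElem_take (h := hmt)).symm
  rw [this]; exact List.getElem_mem _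

lemma pvJs (order : List Int) {n m : Nat} (hm : m < n) (hn : n ≤ order.length) :
    ((order.take n).map (pvNorm n)).getD m 0 = pvNorm n (order.getD m 0) := by
  have hml : m < order.length := lt_of_lt_of_le hm hn
  have hmt : m < (order.take n).length := by simp [List.length_take]; omega
  have hmm : m < ((order.take n).map (pvNorm n)).length := by simpa using hmt
  rw [List.getD_eq_getElem _ _ hmm, List.getD_eq_getElem _ _ hml]
  simp [List.getElem_take]

lemma pvScatter_norm (n : Nat) (hd : List Int) :
    ∀ (labs cc : List Int), cc.length = n →
      (∀ j ∈ hd, -(n : Int) ≤ j ∧ j < (n : Int)) →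
      (hd.zip labs).foldl (fun cc jl => PySem.List.pySetD cc jl.1 jl.2) cc
        = ((hd.map (pvNorm n)).zip labs).foldl (fun cc jl => cc.set jl.1 jl.2) cc := by
  induction hd with
  | nil => intro labs cc _ _; simp
  | cons j t ih =>
    intro labs cc hlen hj
    cases labs with
    | nil => simp
    | cons c ls =>
      simp only [List.map_cons, List.zip_cons_cons, List.foldl_cons]
      have hr : -(cc.length : Int) ≤ j ∧ j < (cc.length : Int) := by
        rw [hlen]; exact hj j (by simp)
      rw [pvSetD_eq cc c hr, hlen]
      exact ih ls _ (by simp [hlen]) (fun x hx => hj x (by simp [hx]))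

lemma pvZipScatter (cs : List Char) (rest : List Nat) :
    ∀ (j0 : Nat) (c0 : Int) (cc : List Int),
      (((j0 :: rest).zip (c0 :: pvLabels cs j0 c0 rest)).foldl
          (fun cc jl => cc.set jl.1 jl.2) cc)
        = (rest.foldl (pvStep cs) (j0, c0, cc.set j0 c0)).2.2 := by
  induction rest with
  | nil => intro j0 c0 cc; simp [pvLabels]
  | cons j1 t ih =>
    intro j0 c0 cc
    simp only [pvLabels, List.zip_cons_cons, List.foldl_cons]
    have h := ih j1 (if cs.getD j1 ' ' ≠ cs.getD j0 ' ' then c0 + 1 else c0) (cc.set j0 c0)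
    simp only [List.zip_cons_cons, List.foldl_cons] at h
    rw [h]
    simp [pvStep]

lemma pvStepInv (cs : List Char) (n : Nat) (l : List Nat) :
    ∀ (st : Nat × Int × List Int), st.2.2.length = n → st.1 < n →
      st.2.2.getD st.1 0 = st.2.1 → (∀ j ∈ l, j < n) →
      ((l.foldl (pvStep cs) st).2.2.length = n ∧ (l.foldl (pvStep cs) st).1 < n ∧
        (l.foldl (pvStep cs) st).2.2.getD ((l.foldl (pvStep cs) st).1) 0
          = (l.foldl (pvStep cs) st).2.1) := by
  induction l with
  | nil => intro st h1 h2 h3 _; exact ⟨h1, h2, h3⟩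
  | cons j t ih =>
    intro st h1 h2 h3 hl
    have hj : j < n := hl j (by simp)
    simp only [List.foldl_cons]
    apply ih
    · simp [pvStep, h1]
    · exact hj
    · simp only [pvStep]
      have hjl : j < st.2.2.length := by omega
      simp [List.getD_eq_getElem?_getD, List.getElem?_set_self hjl]
    · exact fun x hx => hl x (by simp [hx])

lemma pvTailGetD {α : Type} (l : List α) (k : Nat) (d : α) :
    l.tail.getD k d = l.getD (k + 1) d := by
  cases l <;> rfl

lemma pvStep_snd (cs : List Char) (st : Nat × Int × List Int) (j : Nat) :
    (pvStep cs st j).2.2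
      = st.2.2.set j (if cs.getD j ' ' ≠ cs.getD st.1 ' ' then st.2.1 + 1 else st.2.1) := rfl

-- A's loop, k steps in, equals the reference loop on the first k normalised positions,
-- and its last-written position is the k-th normalised index.
lemma pvAloop (cs : List Char) (order : List Int) (jsL : List Nat) (cc0 : List Int)
    (hn : 1 ≤ cs.length) (hlen : cs.length ≤ order.length)
    (hr : ∀ j ∈ order.take cs.length, -(cs.length : Int) ≤ j ∧ j < (cs.length : Int))
    (hjs : jsL = (order.take cs.length).map (pvNorm cs.length))
    (hcc : cc0 = (List.replicate cs.length (0 : Int)).set (jsL.getD 0 0) 0) :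
    ∀ k, k ≤ cs.length - 1 →
      (PySem.List.pyRange 1 ((k : Int) + 1)).foldl (fun cc i =>
        if PySem.List.pyGetD cs (PySem.List.pyGetD order i 0) ' '
             ≠ PySem.List.pyGetD cs (PySem.List.pyGetD order (i - 1) 0) ' ' then
          PySem.List.pySetD cc (PySem.List.pyGetD order i 0)
            (PySem.List.pyGetD cc (PySem.List.pyGetD order (i - 1) 0) 0 + 1)
        else
          PySem.List.pySetD cc (PySem.List.pyGetD order i 0)
            (PySem.List.pyGetD cc (PySem.List.pyGetD order (i - 1) 0) 0)) cc0
        = ((jsL.tail.take k).foldl (pvStep cs) (jsL.getD 0 0, 0, cc0)).2.2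
      ∧ ((jsL.tail.take k).foldl (pvStep cs) (jsL.getD 0 0, 0, cc0)).1 = jsL.getD k 0 := by
  have hjlen : jsL.length = cs.length := by rw [hjs]; simp [List.length_take]; omega
  have hjget : ∀ m, m < cs.length → jsL.getD m 0 = pvNorm cs.length (order.getD m 0) := by
    intro m hm; rw [hjs]; exact pvJs order hm hlen
  have hjall : ∀ j ∈ jsL, j < cs.length := by
    intro j hj; rw [hjs] at hj
    obtain ⟨x, hx, rfl⟩ := List.mem_map.1 hj
    exact pvNorm_lt (hr x hx)
  have hj0lt : jsL.getD 0 0 < cs.length := by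
    apply hjall
    have h0 : 0 < jsL.length := by omega
    rw [List.getD_eq_getElem _ _ h0]
    exact List.getElem_mem _
  have hcc0len : cc0.length = cs.length := by rw [hcc]; simp
  have hcc0get : cc0.getD (jsL.getD 0 0) 0 = 0 := by
    rw [hcc]
    simp [List.getD_eq_getElem?_getD]
  intro k
  induction k with
  | zero =>
    intro _
    constructor
    · have h1 : ((0 : Nat) : Int) + 1 = 1 := by norm_num
      rw [h1, PySem.List.pyRange_one_eq_nil (le_refl 1)]
      simp
    · simp
  | succ k ih =>
    intro hk
    obtain ⟨ihA, ihP⟩ := ih (by omega)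
    have hk1 : k + 1 < cs.length := by omega
    have htl : k < jsL.tail.length := by simp [List.length_tail]; omega
    have htake : jsL.tail.take (k + 1) = jsL.tail.take k ++ [jsL.tail.getD k 0] := by
      rw [List.take_add_one, List.getElem?_eq_getElem htl, List.getD_eq_getElem _ _ htl]
      simp
    have hcast : ((k + 1 : Nat) : Int) + 1 = (((k : Nat) : Int) + 1) + 1 := by push_cast; ring
    rw [hcast, PySem.List.pyRange_one_succ_right (show (1 : Int) ≤ (k : Int) + 1 by omega),
      List.foldl_append, htake, List.foldl_append]
    simp only [List.foldl_cons, List.foldl_nil]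
    rw [ihA]
    obtain ⟨hstlen, hstlt, hstget⟩ := pvStepInv cs cs.length (jsL.tail.take k)
      (jsL.getD 0 0, 0, cc0) hcc0len hj0lt hcc0get
      (fun j hj => hjall j (List.mem_of_mem_tail (List.mem_of_mem_take hj)))
    set st := (jsL.tail.take k).foldl (pvStep cs) (jsL.getD 0 0, 0, cc0) with hst
    have e1 : ((k : Int) + 1) = ((k + 1 : Nat) : Int) := by push_cast; ring
    have e0 : ((k : Int) + 1 - 1) = ((k : Nat) : Int) := by ring
    have hga : PySem.List.pyGetD order ((k : Int) + 1) 0 = order.getD (k + 1) 0 := by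
      rw [e1]
      simp only [PySem.List.pyGetD_natCast]
    have hgb : PySem.List.pyGetD order ((k : Int) + 1 - 1) 0 = order.getD k 0 := by
      rw [e0]
      simp only [PySem.List.pyGetD_natCast]
    have hr1 := hr _ (pvMemTake order hk1 hlen)
    have hr0 := hr _ (pvMemTake order (show k < cs.length by omega) hlen)
    have hcs1 : PySem.List.pyGetD cs (order.getD (k + 1) 0) ' ' = cs.getD (jsL.getD (k + 1) 0) ' ' := by
      rw [pvGetD_eq cs ' ' hr1, hjget (k + 1) hk1]
    have hcs0 : PySem.List.pyGetD cs (order.getD k 0) ' ' = cs.getD (jsL.getD k 0) ' ' := by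
      rw [pvGetD_eq cs ' ' hr0, hjget k (by omega)]
    have hget : PySem.List.pyGetD st.2.2 (order.getD k 0) 0 = st.2.1 := by
      rw [pvGetD_eq st.2.2 0 (by rw [hstlen]; exact hr0), hstlen, ← hjget k (by omega), ← ihP]
      exact hstget
    have hset : ∀ v, PySem.List.pySetD st.2.2 (order.getD (k + 1) 0) v
        = st.2.2.set (jsL.getD (k + 1) 0) v := by
      intro v
      rw [pvSetD_eq st.2.2 v (by rw [hstlen]; exact hr1), hstlen, ← hjget (k + 1) hk1]
    have htg : jsL.tail.getD k 0 = jsL.getD (k + 1) 0 := pvTailGetD jsL k 0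
    rw [hga, hgb, hcs1, hcs0, hget, htg]
    constructor
    · simp only [hset]
      rw [pvStep_snd, ihP, ← apply_ite (st.2.2.set (jsL.getD (k + 1) 0))]
    · simp [pvStep]

-- B's enumerate-scatter is the fold over the flattened (position, class) writes.
lemma pvScatter_flat (runs : List (List Int)) :
    ∀ (s : Int) (res : List Int),
      (PySem.List.enumerate runs s).foldl
        (fun res kr => kr.2.foldl (fun res j => PySem.List.pySetD res j kr.1) res) res
      = (pvFW runs s).foldl (fun res p => PySem.List.pySetD res p.1 p.2) res := by
  induction runs with
  | nil => intro s res; simp [pvFW, PySem.List.enumerate_nil]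
  | cons r t ih =>
    intro s res
    rw [PySem.List.enumerate_cons]
    simp only [List.foldl_cons, pvFW, List.foldl_append, List.foldl_map]
    rw [ih]

lemma pvFW_append (runs : List (List Int)) (r : List Int) :
    ∀ s, pvFW (runs ++ [r]) s = pvFW runs s ++ r.map (fun j => (j, s + runs.length)) := by
  induction runs with
  | nil => intro s; simp [pvFW]
  | cons a t ih =>
    intro s
    have hs : s + 1 + (t.length : Int) = s + ((t.length : Int) + 1) := by ring
    simp only [List.cons_append, pvFW, ih (s + 1), List.length_cons, Nat.cast_add,
      Nat.cast_one, hs, List.append_assoc]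

-- The runs fold, flattened, produces exactly the (position, label) pairs of pvLab.
lemma pvRunsFlat (cs : List Char) (l : List Int) :
    ∀ (R : List (List Int)) (r : List Int) (p : Int), r ≠ [] → r.getLast? = some p →
      pvFW (l.foldl (pvRunsStep cs) (R ++ [r])) 0
        = pvFW (R ++ [r]) 0 ++ l.zip (pvLab cs p (R.length : Int) l) := by
  induction l with
  | nil => intro R r p _ _; simp [pvLab]
  | cons j t ih =>
    intro R r p hne hp
    have hlast : (R ++ [r]).getLast? = some r := by
      rw [List.getLast?_append]
      simp
    have hlastD : r.getLastD 0 = p := by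
      simp [List.getLastD_eq_getLast?, hp]
    simp only [List.foldl_cons, pvRunsStep, hlast, hlastD, pvLab]
    by_cases hc : PySem.List.pyGetD cs p ' ' = PySem.List.pyGetD cs j ' '
    · rw [if_pos hc]
      have hdl : (R ++ [r]).dropLast = R := by simp
      rw [hdl]
      have hlast' : (r ++ [j]).getLast? = some j := by
        rw [List.getLast?_append]; simp
      rw [ih R (r ++ [j]) j (by simp) hlast']
      have h1 : pvFW (R ++ [r ++ [j]]) 0 = pvFW (R ++ [r]) 0 ++ [(j, (R.length : Int))] := by
        rw [pvFW_append, pvFW_append]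
        simp [List.map_append, List.append_assoc]
      rw [h1, List.zip_cons_cons, if_pos hc]
      simp [List.append_assoc]
    · rw [if_neg hc]
      have h1 : pvFW ((R ++ [r]) ++ [[j]]) 0
          = pvFW (R ++ [r]) 0 ++ [(j, (R.length : Int) + 1)] := by
        rw [pvFW_append]
        simp
      have h2 : (((R ++ [r]).length : Nat) : Int) = (R.length : Int) + 1 := by simp
      rw [ih (R ++ [r]) [j] j (by simp) (by simp), h1, h2]
      simp [List.append_assoc, hc]

-- On in-range positions, B's Int labels are A's normalised labels.
lemma pvLab_eq_pvLabels (cs : List Char) (l : List Int) :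
    ∀ (p : Int) (c : Int),
      (-(cs.length : Int) ≤ p ∧ p < (cs.length : Int)) →
      (∀ j ∈ l, -(cs.length : Int) ≤ j ∧ j < (cs.length : Int)) →
      pvLab cs p c l = pvLabels cs (pvNorm cs.length p) c (l.map (pvNorm cs.length)) := by
  induction l with
  | nil => intro p c _ _; simp [pvLab, pvLabels]
  | cons j t ih =>
    intro p c hp hl
    have hj := hl j (by simp)
    simp only [pvLab, pvLabels, List.map_cons]
    rw [pvGetD_eq cs ' ' hp, pvGetD_eq cs ' ' hj]
    have hco : (if cs.getD (pvNorm cs.length p) ' ' = cs.getD (pvNorm cs.length j) ' '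
          then c else c + 1)
        = (if cs.getD (pvNorm cs.length j) ' ' ≠ cs.getD (pvNorm cs.length p) ' '
          then c + 1 else c) := by
      by_cases h : cs.getD (pvNorm cs.length p) ' ' = cs.getD (pvNorm cs.length j) ' '
      · rw [if_pos h, if_neg (not_not_intro h.symm)]
      · rw [if_neg h, if_pos (Ne.symm h)]
    rw [hco]
    exact congrArg _ (ih j _ hj (fun x hx => hl x (by simp [hx])))

-- ===== VERDICT (by name: the statement is the Claim_ definition above) =====
theorem compute_char_classes_spec : Claim_equal_compute_char_classes := by
  intro S order _ hpre
  obtain ⟨hn, hlen, hr⟩ := hpre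
  unfold Spec_compute_char_classes
  set cs := S.toList with hcsdef
  set jsL := (order.take cs.length).map (pvNorm cs.length) with hjs
  have hn0 : 0 < cs.length := hn
  have hjlen : jsL.length = cs.length := by rw [hjs]; simp [List.length_take]; omega
  have hjget : ∀ m, m < cs.length → jsL.getD m 0 = pvNorm cs.length (order.getD m 0) := by
    intro m hm; rw [hjs]; exact pvJs order hm hlen
  obtain ⟨j0, rest, hcons⟩ : ∃ j0 rest, jsL = j0 :: rest := by
    cases h : jsL with
    | nil => rw [h] at hjlen; simp at hjlen; omega
    | cons a t => exact ⟨a, t, rfl⟩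
  -- reduce A's port
  have hA : compute_char_classes S order
      = (rest.foldl (pvStep cs) (j0, 0, (List.replicate cs.length (0 : Int)).set j0 0)).2.2 := by
    simp only [compute_char_classes, ← hcsdef]
    have h00 : PySem.List.pyGetD order 0 0 = order.getD 0 0 := PySem.List.pyGetD_zero order 0
    have hcc0 : PySem.List.pySetD (List.replicate cs.length (0 : Int)) (order.getD 0 0) 0
        = (List.replicate cs.length (0 : Int)).set (jsL.getD 0 0) 0 := by
      rw [pvSetD_eq _ _ (by simpa using hr _ (pvMemTake order hn0 hlen))]
      simp only [List.length_replicate]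
      rw [← hjget 0 hn0]
    rw [h00, hcc0]
    have hrange : (cs.length : Int) = ((cs.length - 1 : Nat) : Int) + 1 := by omega
    rw [hrange]
    obtain ⟨hAA, _⟩ := pvAloop cs order jsL
      ((List.replicate cs.length (0 : Int)).set (jsL.getD 0 0) 0) hn hlen hr hjs rfl
      (cs.length - 1) (le_refl _)
    rw [hAA, List.take_of_length_le (by simp [List.length_tail, hjlen])]
    simp [hcons]
  -- reduce B's port
  have hB : compute_char_classes_alt S order
      = (rest.foldl (pvStep cs) (j0, 0, (List.replicate cs.length (0 : Int)).set j0 0)).2.2 := by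
    simp only [compute_char_classes_alt, ← hcsdef]
    have hgather : (PySem.List.pyRange 0 (cs.length : Int)).map
        (fun i => PySem.List.pyGetD order i 0) = order.take cs.length := by
      apply List.ext_getElem
      · simp [PySem.List.length_pyRange_one]
        omega
      · intro i h1 h2
        rw [List.getElem_map, PySem.List.getElem_pyRange_one]
        have hz : (0 : Int) + (i : Int) = ((i : Nat) : Int) := by ring
        have hio : i < order.length := by
          have := h2; simp [List.length_take] at this; omega
        rw [hz, PySem.List.pyGetD_natCast, List.getElem_take,
          List.getD_eq_getElem _ _ hio]
    rw [hgather]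
    set l := order.take cs.length with hl
    have hstep : (fun (runs : List (List Int)) j =>
        match runs.getLast? with
        | some r =>
          if PySem.List.pyGetD cs (r.getLastD 0) ' ' = PySem.List.pyGetD cs j ' '
          then runs.dropLast ++ [r ++ [j]]
          else runs ++ [[j]]
        | none => runs ++ [[j]]) = pvRunsStep cs := rfl
    rw [hstep]
    have hllen : l.length = cs.length := by rw [hl]; simp [List.length_take]; omega
    obtain ⟨jI0, restI, hlcons⟩ : ∃ jI0 restI, l = jI0 :: restI := by
      cases h : l with
      | nil => rw [h] at hllen; simp at hllen; omega
      | cons a t => exact ⟨a, t, rfl⟩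
    have hjI0 : jI0 ∈ l := by rw [hlcons]; simp
    have hrestI : ∀ j ∈ restI, j ∈ l := by intro j hj; rw [hlcons]; simp [hj]
    -- first fold step creates the first run
    have hfold1 : l.foldl (pvRunsStep cs) [] = restI.foldl (pvRunsStep cs) [[jI0]] := by
      rw [hlcons, List.foldl_cons]
      rfl
    rw [hfold1]
    rw [pvScatter_flat]
    have hflat := pvRunsFlat cs restI [] [jI0] jI0 (by simp) rfl
    simp only [List.nil_append, List.length_nil, Nat.cast_zero] at hflat
    rw [hflat]
    have hfw1 : pvFW [[jI0]] 0 = [(jI0, (0 : Int))] := by simp [pvFW]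
    rw [hfw1]
    have hpairs : ((jI0, (0 : Int)) :: restI.zip (pvLab cs jI0 0 restI))
        = l.zip ((0 : Int) :: pvLab cs jI0 0 restI) := by
      rw [hlcons, List.zip_cons_cons]
    rw [List.singleton_append, hpairs]
    -- pySetD fold over pairs = set fold over normalised pairs
    have hfoldeq : (l.zip ((0 : Int) :: pvLab cs jI0 0 restI)).foldl
          (fun res p => PySem.List.pySetD res p.1 p.2) (List.replicate cs.length (0 : Int))
        = ((l.map (pvNorm cs.length)).zip ((0 : Int) :: pvLab cs jI0 0 restI)).foldl
          (fun cc jl => cc.set jl.1 jl.2) (List.replicate cs.length (0 : Int)) := by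
      exact pvScatter_norm cs.length l _ _ (by simp) hr
    rw [hfoldeq]
    have hlab : pvLab cs jI0 0 restI = pvLabels cs (pvNorm cs.length jI0) 0
        (restI.map (pvNorm cs.length)) :=
      pvLab_eq_pvLabels cs restI jI0 0 (hr jI0 hjI0) (fun j hj => hr j (hrestI j hj))
    have hmap : pvNorm cs.length jI0 :: restI.map (pvNorm cs.length) = j0 :: rest := by
      rw [← List.map_cons, ← hlcons, ← hjs, hcons]
    have hj0 : pvNorm cs.length jI0 = j0 := by injection hmap
    have hrest : restI.map (pvNorm cs.length) = rest := by injection hmap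
    have hmapl : l.map (pvNorm cs.length) = j0 :: rest := by
      rw [hlcons, List.map_cons, hmap]
    rw [hlab, hj0, hrest, hmapl]
    exact pvZipScatter cs rest j0 0 (List.replicate cs.length (0 : Int))
  rw [hA, hB]
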